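-- pv_equiv track=rewrite | github.com/ziwanghuang/ai-dataplatform-ops | python/src/aiops/security/rbac.py | _infer_component
-- ===== SOURCE A (Python) =====
-- def _infer_component(tool_name: str) -> str | None:
--     """从工具名推断组件."""
--     prefix_map = {
--         "hdfs_": "hdfs", "yarn_": "yarn", "kafka_": "kafka",
--         "es_": "es", "zk_": "zk", "ops_": "ops",
--     }
--     for prefix, component in prefix_map.items():
--         if tool_name.startswith(prefix):
--             return component
--     return None
-- ===== SOURCE B (Python) =====
-- def _infer_component(tool_name: str) -> str | None:
--     """从工具名推断组件."""
--     prefix_map = {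
--         "hdfs_": "hdfs", "yarn_": "yarn", "kafka_": "kafka",
--         "es_": "es", "zk_": "zk", "ops_": "ops",
--     }
--     # key = everything up to and including the first underscore ('' if none)
--     return prefix_map.get(tool_name[:tool_name.find("_") + 1])
-- ===== Notes on version B (the rewrite author's own statement) =====
-- stated objective: idiomatic
-- what changed: Instead of scanning the six prefixes and testing startswith for each, B derives the lookup key directly from the string (everything up to and including the first underscore) and does a single dict lookup.
import Mathlib
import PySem

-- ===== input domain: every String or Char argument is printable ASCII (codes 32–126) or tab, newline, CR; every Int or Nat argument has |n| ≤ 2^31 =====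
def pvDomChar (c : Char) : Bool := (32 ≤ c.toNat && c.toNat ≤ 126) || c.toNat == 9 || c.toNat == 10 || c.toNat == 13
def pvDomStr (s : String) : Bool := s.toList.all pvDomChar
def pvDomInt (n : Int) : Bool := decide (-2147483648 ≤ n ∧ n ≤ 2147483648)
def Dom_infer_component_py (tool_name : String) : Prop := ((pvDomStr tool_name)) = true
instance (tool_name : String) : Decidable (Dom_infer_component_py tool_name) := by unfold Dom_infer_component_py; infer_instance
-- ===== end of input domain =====

-- B replaces A's prefix scan with key construction + a single dict lookup (same return values; more idiomatic).

-- ===== PORT A =====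
-- A scans the prefix→component pairs in order and returns the first whose prefix starts the name.
def inferLoop (s : String) : List (String × String) → Option String
  | [] => none
  | (p, c) :: rest => if PySem.Str.startswith s p then some c else inferLoop s rest

def infer_component_py (tool_name : String) : Option String :=
  inferLoop tool_name
    [("hdfs_", "hdfs"), ("yarn_", "yarn"), ("kafka_", "kafka"),
     ("es_", "es"), ("zk_", "zk"), ("ops_", "ops")]

-- ===== PORT B =====
-- B derives the lookup key (everything up to and including the first underscore,
-- '' if there is none) and does a single dict lookup instead of scanning the prefixes.
def infer_component_py_alt (tool_name : String) : Option String :=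
  let prefixMap : PySem.Dict String String :=
    PySem.Dict.ofList
      [("hdfs_", "hdfs"), ("yarn_", "yarn"), ("kafka_", "kafka"),
       ("es_", "es"), ("zk_", "zk"), ("ops_", "ops")]
  prefixMap.get? (PySem.Str.slice tool_name none (some (PySem.Str.find tool_name "_" + 1)))

-- ===== PRECONDITION & SPEC =====
def Spec_infer_component_py (tool_name : String) (out : Option String) : Prop := out = infer_component_py_alt tool_name
instance (tool_name : String) (out : Option String) : Decidable (Spec_infer_component_py tool_name out) := by unfold Spec_infer_component_py; infer_instance

-- ===== CLAIM (what is proved, stated in full; the proofs are below) =====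
def Claim_equal_infer_component_py : Prop := ∀ (tool_name : String), Dom_infer_component_py tool_name → Spec_infer_component_py tool_name (infer_component_py tool_name)

-- ===== LEMMAS AND PROOFS =====

theorem singleton_prefix_iff (a : Char) (l : List Char) : [a] <+: l ↔ l[0]? = some a := by
  cases l with
  | nil => simp
  | cons b t => simp [List.cons_prefix_cons, eq_comm]

-- the computed key equals a prefix "cs_" (cs underscore-free) exactly when the name starts with it
theorem key_eq_prefix_iff (L cs : List Char) (h : ('_' : Char) ∉ cs) :
    PySem.Chars.slice L none (some (PySem.Chars.find L [('_' : Char)] + 1)) = cs ++ ['_'] ↔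
      (cs ++ ['_']) <+: L := by
  by_cases hf : PySem.Chars.find L [('_' : Char)] = -1
  · have hnotin : ¬ [('_' : Char)] <:+: L := (PySem.Chars.find_eq_neg_one_iff L _).mp hf
    rw [hf]
    have h0 : (-1 : Int) + 1 = ((0 : Nat) : Int) := by norm_num
    rw [h0, PySem.Chars.slice_eq_listSlice, PySem.List.slice_to_natCast]
    simp only [List.take_zero]
    constructor
    · intro hc; exact absurd hc.symm (by simp)
    · intro hp
      exact absurd (List.IsInfix.trans ⟨cs, [], by simp⟩ hp.isInfix) hnotin
  · have hge : 0 ≤ PySem.Chars.find L [('_' : Char)] := by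
      have := PySem.Chars.neg_one_le_find L [('_' : Char)]
      omega
    obtain ⟨hpre, hmin⟩ := PySem.Chars.find_spec (s := L) (sub := [('_' : Char)]) hge
    set n := (PySem.Chars.find L [('_' : Char)]).toNat with hn
    have hfn : PySem.Chars.find L [('_' : Char)] = (n : Int) := (Int.toNat_of_nonneg hge).symm
    have hLn : L[n]? = some '_' := by
      have h0 := (singleton_prefix_iff '_' (L.drop n)).mp hpre
      simpa [List.getElem?_drop] using h0
    have hmin' : ∀ i, i < n → L[i]? ≠ some '_' := by
      intro i hi hc
      exact hmin i hi ((singleton_prefix_iff '_' (L.drop i)).mpr (by simpa [List.getElem?_drop] using hc))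
    have hcast : PySem.Chars.find L [('_' : Char)] + 1 = ((n + 1 : Nat) : Int) := by
      rw [hfn]; push_cast; ring
    rw [hcast, PySem.Chars.slice_eq_listSlice, PySem.List.slice_to_natCast]
    constructor
    · intro hk
      rw [← hk]; exact List.take_prefix _ _
    · intro hp
      obtain ⟨t, rfl⟩ := hp
      have hm : n = cs.length := by
        rcases Nat.lt_trichotomy n cs.length with hlt | heq | hgt
        · exfalso
          have : (cs ++ ['_'] ++ t)[n]? = cs[n]? := by
            rw [List.append_assoc, List.getElem?_append_left hlt]
          rw [this] at hLn
          exact h (List.mem_of_getElem? hLn)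
        · exact heq
        · exfalso
          have hcl : cs.length < (cs ++ ['_']).length := by simp
          have : (cs ++ ['_'] ++ t)[cs.length]? = some '_' := by
            rw [List.getElem?_append_left hcl]
            simp
          exact hmin' cs.length hgt this
      have hlen : cs.length + 1 = (cs ++ ['_']).length := by simp
      rw [hm, hlen]; exact List.take_left

-- each startswith test of A equals the key-comparison B's dict lookup performs
theorem cond_eq (s : String) (cs : List Char) (h : ('_' : Char) ∉ cs) :
    (String.ofList (cs ++ ['_']) == PySem.Str.slice s none (some (PySem.Str.find s "_" + 1))) =
      PySem.Str.startswith s (String.ofList (cs ++ ['_'])) := by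
  rw [Bool.eq_iff_iff, beq_iff_eq]
  have h1 : PySem.Str.startswith s (String.ofList (cs ++ ['_'])) = true ↔ (cs ++ ['_']) <+: s.toList := by
    rw [PySem.Str.startswith_eq, PySem.Chars.startswith_iff, String.toList_ofList]
  rw [h1]
  have h2 : String.ofList (cs ++ ['_']) = PySem.Str.slice s none (some (PySem.Str.find s "_" + 1)) ↔
      (PySem.Str.slice s none (some (PySem.Str.find s "_" + 1))).toList = cs ++ ['_'] := by
    constructor
    · intro he; rw [← he, String.toList_ofList]
    · intro he; apply String.toList_inj.mp; rw [he, String.toList_ofList]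
  rw [h2, PySem.Str.toList_slice, PySem.Str.find_eq]
  exact key_eq_prefix_iff s.toList cs h

-- ===== VERDICT (by name: the statement is the Claim_ definition above) =====
theorem infer_component_py_spec : Claim_equal_infer_component_py := by
  intro s _
  unfold Spec_infer_component_py infer_component_py infer_component_py_alt
  have hd : (PySem.Dict.ofList
      [("hdfs_", "hdfs"), ("yarn_", "yarn"), ("kafka_", "kafka"),
       ("es_", "es"), ("zk_", "zk"), ("ops_", "ops")] : PySem.Dict String String) =
      PySem.Dict.mk
      [("hdfs_", "hdfs"), ("yarn_", "yarn"), ("kafka_", "kafka"),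
       ("es_", "es"), ("zk_", "zk"), ("ops_", "ops")] := by decide
  rw [hd]
  simp only [PySem.Dict.get?_mk_cons, inferLoop]
  rw [show ("hdfs_" : String) = String.ofList ("hdfs".toList ++ ['_']) from by decide,
      show ("yarn_" : String) = String.ofList ("yarn".toList ++ ['_']) from by decide,
      show ("kafka_" : String) = String.ofList ("kafka".toList ++ ['_']) from by decide,
      show ("es_" : String) = String.ofList ("es".toList ++ ['_']) from by decide,
      show ("zk_" : String) = String.ofList ("zk".toList ++ ['_']) from by decide,
      show ("ops_" : String) = String.ofList ("ops".toList ++ ['_']) from by decide,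
      cond_eq s "hdfs".toList (by decide), cond_eq s "yarn".toList (by decide),
      cond_eq s "kafka".toList (by decide), cond_eq s "es".toList (by decide),
      cond_eq s "zk".toList (by decide), cond_eq s "ops".toList (by decide)]
  simp only [PySem.Dict.get?]
  rfl
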